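-- pv_equiv track=rewrite | github.com/AgentAlphaAGI/Idea2Paper | paper_kg/markdown_renderer.py | inject_cite_markers
-- ===== SOURCE A (Python) =====
-- def inject_cite_markers(
--     markdown: str,
--     section_id: str,
--     cite_token: str = "[[CITE]]",
--     require_cite_ids: bool = True,
-- ) -> str:
--     """Replace cite tokens with stable CITE_CANDIDATE markers (skip code fences)."""
--     if not markdown or cite_token not in markdown:
--         return markdown
--
--     lines = markdown.splitlines()
--     in_code = False
--     counter = 1
--     for idx, line in enumerate(lines):
--         stripped = line.strip()
--         if stripped.startswith("```"):
--             in_code = not in_code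
--             continue
--         if in_code or cite_token not in line:
--             continue
--         parts = line.split(cite_token)
--         if len(parts) == 1:
--             continue
--         rebuilt = parts[0]
--         for tail in parts[1:]:
--             marker = (
--                 f"<!-- CITE_CANDIDATE:{section_id}_{counter:03d} -->"
--                 if require_cite_ids
--                 else "<!-- CITE_CANDIDATE -->"
--             )
--             counter += 1
--             if rebuilt and not rebuilt.endswith((" ", "\t")):
--                 rebuilt += " "
--             rebuilt += marker + tail
--         lines[idx] = rebuilt
--     return "\n".join(lines)
-- ===== SOURCE B (Python) =====
-- def inject_cite_markers(
--     markdown: str,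
--     section_id: str,
--     cite_token: str = "[[CITE]]",
--     require_cite_ids: bool = True,
-- ) -> str:
--     """Replace cite tokens with stable CITE_CANDIDATE markers (skip code fences)."""
--     if not markdown or cite_token not in markdown:
--         return markdown
--
--     lines = markdown.splitlines()
--
--     # phase 1: fence flags and the fence-parity state *before* each line
--     fence = [ln.strip().startswith("```") for ln in lines]
--     before = []
--     s = False
--     for f in fence:
--         before.append(s)
--         s ^= f
--
--     # phase 2: split every eligible line once (None = line left untouched)
--     parts_of = [
--         ln.split(cite_token) if not f and not b and cite_token in ln else None
--         for ln, f, b in zip(lines, fence, before)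
--     ]
--
--     # phase 3: global marker numbers by prefix sums of per-line token counts
--     starts = []
--     n = 1
--     for p in parts_of:
--         starts.append(n)
--         if p is not None:
--             n += len(p) - 1
--
--     def marker(k):
--         return ("<!-- CITE_CANDIDATE:%s_%03d -->" % (section_id, k)
--                 if require_cite_ids else "<!-- CITE_CANDIDATE -->")
--
--     def glue(prev, first):
--         # spacing is local: the char before the marker is prev[-1] if prev is
--         # non-empty, else nothing at line start (first) or '>' of the previous marker
--         if prev:
--             return "" if prev[-1] in (" ", "\t") else " "
--         return "" if first else " "
--
--     # phase 4: stateless per-line rebuild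
--     out = []
--     for ln, p, k in zip(lines, parts_of, starts):
--         if p is None:
--             out.append(ln)
--         else:
--             out.append(p[0] + "".join(
--                 glue(p[i - 1], i == 1) + marker(k + i - 1) + p[i]
--                 for i in range(1, len(p))))
--     return "\n".join(out)
-- ===== Notes on version B (the rewrite author's own statement) =====
-- stated objective: alternative
-- what changed: A is one stateful pass that mutates the lines list while threading an in_code toggle, a running counter and a growing 'rebuilt' accumulator; B is staged: a parity pass computes the fence state before each line, eligible lines are split once into a parts table, global marker numbers come from prefix sums of per-line counts, and each line is rebuilt statelessly by joining locally computed glue+marker+part pieces (the space decision provably depends only on the preceding split part).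
-- outside the precondition, e.g. on inject_cite_markers('```', 's', '', True): A returns '```', B returns '```'; on inject_cite_markers('x', 's', '', True): A raises ValueError, B raises ValueError
import Mathlib
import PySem

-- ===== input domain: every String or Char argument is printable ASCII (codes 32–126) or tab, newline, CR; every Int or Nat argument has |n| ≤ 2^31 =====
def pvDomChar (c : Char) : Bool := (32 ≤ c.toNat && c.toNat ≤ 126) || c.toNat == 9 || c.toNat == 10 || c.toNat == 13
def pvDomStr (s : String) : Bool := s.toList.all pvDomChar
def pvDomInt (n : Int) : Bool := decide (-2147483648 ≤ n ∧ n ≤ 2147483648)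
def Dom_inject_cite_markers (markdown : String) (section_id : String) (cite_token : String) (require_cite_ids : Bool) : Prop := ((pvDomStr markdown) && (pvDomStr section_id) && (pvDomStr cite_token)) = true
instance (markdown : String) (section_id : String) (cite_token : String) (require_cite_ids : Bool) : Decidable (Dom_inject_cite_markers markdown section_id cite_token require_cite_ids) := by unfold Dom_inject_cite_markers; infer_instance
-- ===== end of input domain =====

-- B replaces A's single stateful pass (in_code toggle + running counter + growing accumulator)
-- by staged passes: fence-parity mask, a one-shot parts table, prefix-sum numbering, and a
-- stateless per-line join of locally computed pieces (objective: alternative).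

-- ===== PORT A =====
-- the marker f-string: "<!-- CITE_CANDIDATE:{section_id}_{counter:03d} -->" ({counter:03d} = zfill 3
-- of str(counter); exact, counter is 1,2,3,… here) or "<!-- CITE_CANDIDATE -->"
def pvMarkerA (sid : List Char) (req : Bool) (counter : Int) : List Char :=
  if req then
    "<!-- CITE_CANDIDATE:".toList ++ sid ++ ['_'] ++
      PySem.Chars.zfill (PySem.Int.toChars counter) 3 ++ " -->".toList
  else "<!-- CITE_CANDIDATE -->".toList

-- 'for tail in parts[1:]' with state (rebuilt, counter)
def pvTailLoopA (sid : List Char) (req : Bool) : List (List Char) → List Char × Int → List Char × Int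
  | [], st => st
  | tail :: rest, st =>
      let marker := pvMarkerA sid req st.2
      let rebuilt :=
        if st.1 ≠ [] ∧ (PySem.Chars.endswith st.1 [' '] || PySem.Chars.endswith st.1 ['\t']) = false
        then st.1 ++ [' '] else st.1
      pvTailLoopA sid req rest (rebuilt ++ marker ++ tail, st.2 + 1)

-- the body of the loop for one non-fence, non-code line containing the token
def pvRebuildA (sid tok : List Char) (req : Bool) (line : List Char) (counter : Int) :
    List Char × Int :=
  let parts := PySem.Chars.splitOn line tok
  if parts.length = 1 then (line, counter)
  else pvTailLoopA sid req parts.tail (parts.headD [], counter)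

def inject_cite_markers (markdown : String) (section_id : String) (cite_token : String)
    (require_cite_ids : Bool) : String :=
  if PySem.Str.len markdown = 0 || !(PySem.Str.isIn cite_token markdown) then markdown
  else
    let lines := (PySem.Str.splitlines markdown).map String.toList
    let st := lines.foldl
      (fun (st : List (List Char) × Bool × Int) line =>
        if PySem.Chars.startswith (PySem.Chars.strip line) "```".toList then
          (st.1 ++ [line], !st.2.1, st.2.2)
        else if st.2.1 || !(PySem.Chars.isIn cite_token.toList line) then
          (st.1 ++ [line], st.2.1, st.2.2)
        else
          let rc := pvRebuildA section_id.toList cite_token.toList require_cite_ids line st.2.2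
          (st.1 ++ [rc.1], st.2.1, rc.2))
      ([], false, 1)
    String.mk (PySem.Chars.join ['\n'] st.1)

-- ===== PORT B =====
def pvMarkerB (sid : List Char) (req : Bool) (k : Int) : List Char :=
  if req then
    "<!-- CITE_CANDIDATE:".toList ++ sid ++ ['_'] ++
      PySem.Chars.zfill (PySem.Int.toChars k) 3 ++ " -->".toList
  else "<!-- CITE_CANDIDATE -->".toList

-- Source B's glue(prev, first): spacing decided locally from the previous split part
def pvGlue (prev : List Char) (first : Bool) : List Char :=
  match prev.getLast? with
  | some c => if c = ' ' ∨ c = '\t' then [] else [' ']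
  | none => if first then [] else [' ']

-- the joined generator over range(1, len(p)): glue(p[i-1], i==1) + marker(k+i-1) + p[i],
-- transcribed as a recursion over the tail carrying the previous part
def pvPieces (sid : List Char) (req : Bool) : List Char → List (List Char) → Bool → Int → List Char
  | _, [], _, _ => []
  | prev, tail :: rest, first, n =>
      pvGlue prev first ++ pvMarkerB sid req n ++ tail ++ pvPieces sid req tail rest false (n + 1)

-- phase 1's running parity: the fence state *before* each line
def pvBefore : List Bool → Bool → List Bool
  | [], _ => []
  | f :: rest, s => s :: pvBefore rest (xor s f)

-- phase 3's prefix sums of per-line token counts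
def pvStarts : List (Option (List (List Char))) → Int → List Int
  | [], _ => []
  | p :: rest, n =>
      n :: pvStarts rest (match p with | none => n | some ps => n + ((ps.length : Int) - 1))

-- phase 4's stateless per-line rebuild
def pvRebuildB (sid : List Char) (req : Bool) (ln : List Char)
    (p : Option (List (List Char))) (k : Int) : List Char :=
  match p with
  | none => ln
  | some ps => ps.headD [] ++ pvPieces sid req (ps.headD []) ps.tail true k

def inject_cite_markers_alt (markdown : String) (section_id : String) (cite_token : String)
    (require_cite_ids : Bool) : String :=
  if PySem.Str.len markdown = 0 || !(PySem.Str.isIn cite_token markdown) then markdown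
  else
    let lines := (PySem.Str.splitlines markdown).map String.toList
    let fence := lines.map (fun ln => PySem.Chars.startswith (PySem.Chars.strip ln) "```".toList)
    let before := pvBefore fence false
    let partsOf := (lines.zip (fence.zip before)).map
      (fun x => if !x.2.1 && !x.2.2 && PySem.Chars.isIn cite_token.toList x.1
        then some (PySem.Chars.splitOn x.1 cite_token.toList) else none)
    let starts := pvStarts partsOf 1
    String.mk (PySem.Chars.join ['\n']
      ((lines.zip (partsOf.zip starts)).map
        (fun x => pvRebuildB section_id.toList require_cite_ids x.1 x.2.1 x.2.2)))

-- ===== PRECONDITION & SPEC =====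
-- Pre_ excludes an empty cite_token: there str.split('') raises ValueError, so A raises on
-- essentially every such input and returns only when its guards or fence skipping keep split
-- from running (an accidental corner); B raises there too.
def Pre_inject_cite_markers (markdown : String) (section_id : String) (cite_token : String)
    (require_cite_ids : Bool) : Prop := cite_token.toList ≠ []
instance (markdown : String) (section_id : String) (cite_token : String) (require_cite_ids : Bool) : Decidable (Pre_inject_cite_markers markdown section_id cite_token require_cite_ids) := by unfold Pre_inject_cite_markers; infer_instance

def pvWitness_inject_cite_markers : String × String × String × Bool :=
  ("see [[CITE]].\n```\nx = [[CITE]]\n```\n[[CITE]][[CITE]]", "intro", "[[CITE]]", true)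

def Spec_inject_cite_markers (markdown : String) (section_id : String) (cite_token : String) (require_cite_ids : Bool) (out : String) : Prop := out = inject_cite_markers_alt markdown section_id cite_token require_cite_ids
instance (markdown : String) (section_id : String) (cite_token : String) (require_cite_ids : Bool) (out : String) : Decidable (Spec_inject_cite_markers markdown section_id cite_token require_cite_ids out) := by unfold Spec_inject_cite_markers; infer_instance

-- ===== CLAIM (what is proved, stated in full; the proofs are below) =====
def Claim_equal_inject_cite_markers : Prop := ∀ (markdown : String) (section_id : String) (cite_token : String) (require_cite_ids : Bool), Dom_inject_cite_markers markdown section_id cite_token require_cite_ids → Pre_inject_cite_markers markdown section_id cite_token require_cite_ids → Spec_inject_cite_markers markdown section_id cite_token require_cite_ids (inject_cite_markers markdown section_id cite_token require_cite_ids)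

-- ===== LEMMAS AND PROOFS =====

-- a plain recursion equivalent to splitOn's fueled go (proof-side helper)
def pvMsp (sep : List Char) : Nat → List Char → List Char → List (List Char)
  | 0, pre, l => [pre ++ l]
  | fuel + 1, pre, l =>
    match l with
    | [] => [pre]
    | c :: rest =>
      if sep.isPrefixOf l then pre :: pvMsp sep fuel [] (l.drop sep.length)
      else pvMsp sep fuel (pre ++ [c]) rest

theorem pvGo_eq_msp (sep : List Char) (fuel : Nat) :
    ∀ (l cur : List Char) (acc : List (List Char)),
      PySem.Chars.splitOn.go sep fuel l cur acc = acc.reverse ++ pvMsp sep fuel cur.reverse l := by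
  induction fuel with
  | zero => intro l cur acc; simp [PySem.Chars.splitOn.go, pvMsp]
  | succ fuel ih =>
    intro l cur acc
    cases l with
    | nil => simp [PySem.Chars.splitOn.go, pvMsp]
    | cons c rest =>
      by_cases h : sep.isPrefixOf (c :: rest)
      · simp only [PySem.Chars.splitOn.go, pvMsp, h, if_true, ih]
        simp
      · simp only [PySem.Chars.splitOn.go, pvMsp, h, if_false, ih]
        simp

theorem pvSplitOn_eq_msp (l sep : List Char) :
    PySem.Chars.splitOn l sep = pvMsp sep (l.length + 1) [] l := by
  show PySem.Chars.splitOn.go sep (l.length + 1) l [] [] = _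
  rw [pvGo_eq_msp]
  simp

theorem pvFind_eq_of (l sub : List Char) (k : Nat) (h1 : sub <+: l.drop k)
    (h2 : ∀ i < k, ¬ sub <+: l.drop i) : PySem.Chars.find l sub = (k : Int) := by
  have h0 : (0 : Int) ≤ PySem.Chars.find l sub :=
    (PySem.Chars.find_nonneg_iff l sub).2 (h1.isInfix.trans (List.drop_suffix k l).isInfix)
  obtain ⟨hp, hmin⟩ := PySem.Chars.find_spec (s := l) (sub := sub) h0
  rcases lt_trichotomy (PySem.Chars.find l sub).toNat k with hlt | heq | hgt
  · exact absurd hp (h2 _ hlt)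
  · have := Int.toNat_of_nonneg h0
    omega
  · exact absurd h1 (hmin k hgt)

theorem pvSepLenPos (sep : List Char) (hsep : sep ≠ []) : 0 < sep.length := by
  cases sep with
  | nil => exact absurd rfl hsep
  | cons a t => simp

theorem pvMsp_fuel (sep : List Char) (hsep : sep ≠ []) (f1 f2 : Nat) :
    ∀ (pre l : List Char), l.length < f1 → l.length < f2 →
      pvMsp sep f1 pre l = pvMsp sep f2 pre l := by
  induction f1 generalizing f2 with
  | zero => intro pre l h1 h2; omega
  | succ f1 ih =>
    intro pre l h1 h2
    cases f2 with
    | zero => omega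
    | succ f2 =>
      cases l with
      | nil => simp [pvMsp]
      | cons c rest =>
        have hs := pvSepLenPos sep hsep
        simp only [List.length_cons] at h1 h2
        have hd : (List.drop sep.length (c :: rest)).length = rest.length + 1 - sep.length := by
          simp
        by_cases hp : sep.isPrefixOf (c :: rest)
        · simp only [pvMsp, hp, if_true]
          congr 1
          exact ih f2 [] _ (by omega) (by omega)
        · simp only [pvMsp, hp]
          exact ih f2 (pre ++ [c]) rest (by omega) (by omega)

theorem pvMsp_step (sep : List Char) (hsep : sep ≠ []) (fuel : Nat) :
    ∀ (pre l : List Char), l.length < fuel →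
      pvMsp sep fuel pre l =
        if PySem.Chars.find l sep = -1 then [pre ++ l]
        else (pre ++ l.take (PySem.Chars.find l sep).toNat) ::
          PySem.Chars.splitOn (l.drop ((PySem.Chars.find l sep).toNat + sep.length)) sep := by
  induction fuel with
  | zero => intro pre l h; omega
  | succ fuel ih =>
    intro pre l h
    have hs := pvSepLenPos sep hsep
    cases l with
    | nil =>
      have hf : PySem.Chars.find [] sep = -1 := by
        rw [PySem.Chars.find_eq_neg_one_iff]
        intro hc
        exact hsep (by simpa using hc)
      simp [pvMsp, hf]
    | cons c rest =>
      by_cases hp : sep.isPrefixOf (c :: rest)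
      · have hf : PySem.Chars.find (c :: rest) sep = ((0 : Nat) : Int) := by
          apply pvFind_eq_of
          · simpa using (List.isPrefixOf_iff_prefix.1 hp)
          · intro i hi; omega
        rw [hf]
        simp only [pvMsp, hp, if_true]
        have hlt : ((0 : Nat) : Int) ≠ -1 := by decide
        rw [if_neg hlt]
        simp only [Int.toNat_natCast, List.take_zero, List.append_nil, Nat.zero_add]
        have hd : (List.drop sep.length (c :: rest)).length = rest.length + 1 - sep.length := by
          simp
        simp only [List.length_cons] at h
        congr 1
        rw [pvSplitOn_eq_msp]
        exact pvMsp_fuel sep hsep fuel _ [] _ (by omega) (by omega)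
      · have hp' : ¬ sep <+: (c :: rest) := fun hc => hp (List.isPrefixOf_iff_prefix.2 hc)
        by_cases hr : PySem.Chars.find rest sep = -1
        · have hf : PySem.Chars.find (c :: rest) sep = -1 := by
            rw [PySem.Chars.find_eq_neg_one_iff]
            rw [PySem.Chars.find_eq_neg_one_iff] at hr
            intro hc
            rcases List.infix_cons_iff.1 hc with h | h
            · exact hp' h
            · exact hr h
          simp only [pvMsp, hp, if_false]
          rw [ih (pre ++ [c]) rest (by simp at h ⊢; omega)]
          simp [hf, hr]
        · have h0 : (0 : Int) ≤ PySem.Chars.find rest sep := by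
            have := PySem.Chars.neg_one_le_find rest sep
            omega
          set k := (PySem.Chars.find rest sep).toNat with hk
          have hrk : PySem.Chars.find rest sep = (k : Int) := by omega
          obtain ⟨hpk, hmink⟩ := PySem.Chars.find_spec (s := rest) (sub := sep) h0
          have hf : PySem.Chars.find (c :: rest) sep = ((k + 1 : Nat) : Int) := by
            apply pvFind_eq_of
            · simpa [List.drop_succ_cons] using hpk
            · intro i hi
              cases i with
              | zero => simpa using hp'
              | succ j =>
                rw [List.drop_succ_cons]
                exact hmink j (by omega)
          rw [hf]
          simp only [pvMsp, hp, if_false]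
          rw [ih (pre ++ [c]) rest (by simp at h ⊢; omega)]
          have hne : ((k + 1 : Nat) : Int) ≠ -1 := by omega
          rw [if_neg hne, if_neg hr]
          simp only [Int.toNat_natCast, hrk, List.take_succ_cons]
          have hdrop : List.drop (k + 1 + sep.length) (c :: rest) = List.drop (k + sep.length) rest := by
            rw [show k + 1 + sep.length = (k + sep.length) + 1 by omega]
            simp
          rw [hdrop]
          simp

theorem pvSplitOn_step (l sep : List Char) (hsep : sep ≠ []) :
    PySem.Chars.splitOn l sep =
      if PySem.Chars.find l sep = -1 then [l]
      else l.take (PySem.Chars.find l sep).toNat ::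
        PySem.Chars.splitOn (l.drop ((PySem.Chars.find l sep).toNat + sep.length)) sep := by
  rw [pvSplitOn_eq_msp, pvMsp_step sep hsep (l.length + 1) [] l (by omega)]
  simp

theorem pvSplitOn_ne_nil (l sep : List Char) (hsep : sep ≠ []) :
    PySem.Chars.splitOn l sep ≠ [] := by
  rw [pvSplitOn_step l sep hsep]
  split <;> simp

-- with the token present in the line, split yields at least two parts
theorem pvSplitOn_len_ne_one (l sep : List Char) (hsep : sep ≠ [])
    (hin : PySem.Chars.isIn sep l = true) :
    ¬ (PySem.Chars.splitOn l sep).length = 1 := by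
  have hne : PySem.Chars.find l sep ≠ -1 := by
    rw [PySem.Chars.find_ne_neg_one_iff]
    exact (PySem.Chars.isIn_iff_infix sep l).1 hin
  have hstep := pvSplitOn_step l sep hsep
  rw [if_neg hne] at hstep
  rw [hstep]
  have := pvSplitOn_ne_nil (l.drop ((PySem.Chars.find l sep).toNat + sep.length)) sep hsep
  simp only [List.length_cons]
  intro hc
  exact this (List.length_eq_zero_iff.1 (by omega))

theorem pvMarkerB_eq (sid : List Char) (req : Bool) (c : Int) :
    pvMarkerB sid req c = pvMarkerA sid req c := rfl

theorem pvGetLastAux {α : Type} (a : α) : ∀ (l t : List α), t.getLast? = some a →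
    (l ++ t).getLast? = some a := by
  intro l t h
  rw [List.getLast?_append, h]
  rfl

theorem pvMarkerA_getLast (sid : List Char) (req : Bool) (c : Int) :
    (pvMarkerA sid req c).getLast? = some '>' := by
  cases req
  · simp only [pvMarkerA, Bool.false_eq_true, if_false]
    decide
  · simp only [pvMarkerA, if_true]
    apply pvGetLastAux
    decide

theorem pvEndswith_singleton (s : List Char) (c : Char) :
    PySem.Chars.endswith s [c] = true ↔ s.getLast? = some c := by
  rw [PySem.Chars.endswith_iff]
  constructor
  · rintro ⟨t, ht⟩
    rw [← ht]
    exact pvGetLastAux c t [c] rfl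
  · intro h
    rcases List.getLast?_eq_some_iff.1 h with ⟨l', hl⟩
    exact ⟨l', hl.symm⟩

-- A's accumulated-string space decision equals B's local glue, given the invariant
-- describing r's last character in terms of the previous part
theorem pvSpace_eq (prev r : List Char) (first : Bool)
    (H : r.getLast? = (match prev.getLast? with
      | some ch => some ch
      | none => if first then none else some '>')) :
    (if r ≠ [] ∧ (PySem.Chars.endswith r [' '] || PySem.Chars.endswith r ['\t']) = false
      then r ++ [' '] else r) = r ++ pvGlue prev first := by
  cases hp : prev.getLast? with
  | none =>
    rw [hp] at H
    simp only [pvGlue, hp]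
    cases first with
    | true =>
      simp only [if_true] at H ⊢
      have : r = [] := List.getLast?_eq_none_iff.1 H
      rw [if_neg (by simp [this])]
      simp
    | false =>
      simp only [Bool.false_eq_true, if_false] at H ⊢
      have hne : r ≠ [] := by intro hc; rw [hc] at H; simp at H
      have h1 : PySem.Chars.endswith r [' '] = false := by
        rw [Bool.eq_false_iff, Ne, pvEndswith_singleton, H]
        decide
      have h2 : PySem.Chars.endswith r ['\t'] = false := by
        rw [Bool.eq_false_iff, Ne, pvEndswith_singleton, H]
        decide
      rw [if_pos ⟨hne, by rw [h1, h2]; rfl⟩]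
  | some ch =>
    rw [hp] at H
    simp only at H
    have hne : r ≠ [] := by intro hc; rw [hc] at H; simp at H
    simp only [pvGlue, hp]
    by_cases hch : ch = ' ' ∨ ch = '\t'
    · have : (PySem.Chars.endswith r [' '] || PySem.Chars.endswith r ['\t']) = true := by
        rcases hch with h | h
        · have := (pvEndswith_singleton r ' ').2 (by rw [H, h])
          simp [this]
        · have := (pvEndswith_singleton r '\t').2 (by rw [H, h])
          simp [this]
      rw [if_neg (by simp [this])]
      simp [hch]
    · have h1 : PySem.Chars.endswith r [' '] = false := by
        rw [Bool.eq_false_iff, Ne, pvEndswith_singleton, H]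
        simp only [Option.some.injEq]
        intro hc; exact hch (Or.inl hc)
      have h2 : PySem.Chars.endswith r ['\t'] = false := by
        rw [Bool.eq_false_iff, Ne, pvEndswith_singleton, H]
        simp only [Option.some.injEq]
        intro hc; exact hch (Or.inr hc)
      rw [if_pos ⟨hne, by rw [h1, h2]; rfl⟩]
      simp [hch]

-- A's stateful tail loop equals appending B's locally built pieces
theorem pvTailLoop_eq (sid : List Char) (req : Bool) :
    ∀ (tails : List (List Char)) (prev r : List Char) (first : Bool) (c : Int),
      r.getLast? = (match prev.getLast? with
        | some ch => some ch
        | none => if first then none else some '>') →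
      pvTailLoopA sid req tails (r, c) =
        (r ++ pvPieces sid req prev tails first c, c + (tails.length : Int)) := by
  intro tails
  induction tails with
  | nil => intro prev r first c _; simp [pvTailLoopA, pvPieces]
  | cons tail rest ih =>
    intro prev r first c H
    rw [pvTailLoopA]
    simp only
    rw [pvSpace_eq prev r first H]
    have H' : ((r ++ pvGlue prev first ++ pvMarkerA sid req c ++ tail).getLast? =
        (match tail.getLast? with
          | some ch => some ch
          | none => some '>')) := by
      cases ht : tail.getLast? with
      | none =>
        have : tail = [] := List.getLast?_eq_none_iff.1 ht
        subst this
        simp only [List.append_nil]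
        exact pvGetLastAux '>' (r ++ pvGlue prev first) _ (pvMarkerA_getLast sid req c)
      | some ch => exact pvGetLastAux ch _ tail ht
    have hIH := ih tail (r ++ pvGlue prev first ++ pvMarkerA sid req c ++ tail) false (c + 1)
      (by rw [H']; cases tail.getLast? <;> simp)
    rw [hIH, pvPieces, pvMarkerB_eq, Prod.mk.injEq]
    constructor
    · simp [List.append_assoc]
    · simp only [List.length_cons]
      push_cast
      ring

-- one line of A's rebuild equals B's stateless rebuild, and the counter advances by the count
theorem pvRebuild_eq (sid tok : List Char) (req : Bool) (htok : tok ≠ []) (line : List Char)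
    (c : Int) (hin : PySem.Chars.isIn tok line = true) :
    pvRebuildA sid tok req line c =
      (pvRebuildB sid req line (some (PySem.Chars.splitOn line tok)) c,
        c + (((PySem.Chars.splitOn line tok).length : Int) - 1)) := by
  unfold pvRebuildA pvRebuildB
  rw [if_neg (pvSplitOn_len_ne_one line tok htok hin)]
  set parts := PySem.Chars.splitOn line tok with hparts
  have hne : parts ≠ [] := pvSplitOn_ne_nil line tok htok
  have H : (parts.headD []).getLast? = (match (parts.headD []).getLast? with
      | some ch => some ch
      | none => (if (true : Bool) then none else some '>')) := by
    cases (parts.headD []).getLast? <;> simp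
  rw [pvTailLoop_eq sid req parts.tail (parts.headD []) (parts.headD []) true c H,
    Prod.mk.injEq]
  have hpos : 0 < parts.length := List.length_pos_iff.2 hne
  constructor
  · rfl
  · simp only [List.length_tail]
    omega

-- the composition of B's stages, as one recursive function for the induction
def pvOutB (sid tok : List Char) (req : Bool) (lines : List (List Char)) (ic : Bool) (c : Int) :
    List (List Char) :=
  let fence := lines.map (fun ln => PySem.Chars.startswith (PySem.Chars.strip ln) "```".toList)
  let partsOf := (lines.zip (fence.zip (pvBefore fence ic))).map
    (fun x => if !x.2.1 && !x.2.2 && PySem.Chars.isIn tok x.1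
      then some (PySem.Chars.splitOn x.1 tok) else none)
  (lines.zip (partsOf.zip (pvStarts partsOf c))).map
    (fun x => pvRebuildB sid req x.1 x.2.1 x.2.2)

theorem pvOutB_cons (sid tok : List Char) (req : Bool) (ln : List Char)
    (rest : List (List Char)) (ic : Bool) (c : Int) :
    pvOutB sid tok req (ln :: rest) ic c =
      (let f := PySem.Chars.startswith (PySem.Chars.strip ln) "```".toList
       let p0 := if !f && !ic && PySem.Chars.isIn tok ln
         then some (PySem.Chars.splitOn ln tok) else none
       pvRebuildB sid req ln p0 c ::
         pvOutB sid tok req rest (xor ic f)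
           (match p0 with | none => c | some ps => c + ((ps.length : Int) - 1))) := by
  simp only [pvOutB, List.map_cons, pvBefore, List.zip_cons_cons, pvStarts]

theorem pvOuter_eq (sid tok : List Char) (req : Bool) (htok : tok ≠ []) :
    ∀ (lines : List (List Char)) (acc : List (List Char)) (ic : Bool) (c : Int),
      (lines.foldl
        (fun (st : List (List Char) × Bool × Int) line =>
          if PySem.Chars.startswith (PySem.Chars.strip line) "```".toList then
            (st.1 ++ [line], !st.2.1, st.2.2)
          else if st.2.1 || !(PySem.Chars.isIn tok line) then
            (st.1 ++ [line], st.2.1, st.2.2)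
          else
            let rc := pvRebuildA sid tok req line st.2.2
            (st.1 ++ [rc.1], st.2.1, rc.2))
        (acc, ic, c)).1 = acc ++ pvOutB sid tok req lines ic c := by
  intro lines
  induction lines with
  | nil => intro acc ic c; simp [pvOutB]
  | cons line rest ih =>
    intro acc ic c
    rw [List.foldl_cons, pvOutB_cons]
    by_cases h1 : PySem.Chars.startswith (PySem.Chars.strip line) "```".toList
    · simp only [h1, if_true, Bool.not_true, Bool.false_and, Bool.xor_true]
      rw [ih]
      simp [pvRebuildB]
    · simp only [h1, if_false, Bool.false_eq_true, Bool.not_false, Bool.true_and, Bool.xor_false]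
      by_cases h2 : (ic || !(PySem.Chars.isIn tok line)) = true
      · have hp0 : (!ic && PySem.Chars.isIn tok line) = false := by
          cases ic <;> simp_all
        simp only [h2, if_true, hp0, Bool.false_eq_true, if_false]
        rw [ih]
        simp [pvRebuildB]
      · have hic : ic = false := by cases ic <;> simp_all
        have hin : PySem.Chars.isIn tok line = true := by
          by_contra hc
          exact h2 (by simp [Bool.eq_false_iff.2 hc])
        subst hic
        simp only [h2, Bool.false_eq_true, if_false, hin, Bool.not_false, Bool.and_true, if_true]
        rw [pvRebuild_eq sid tok req htok line c hin, ih]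
        simp

-- ===== VERDICT (by name: the statement is the Claim_ definition above) =====
theorem inject_cite_markers_spec : Claim_equal_inject_cite_markers := by
  intro markdown section_id cite_token require_cite_ids _hdom hpre
  unfold Spec_inject_cite_markers inject_cite_markers inject_cite_markers_alt
  split
  · rfl
  · have h := pvOuter_eq section_id.toList cite_token.toList require_cite_ids hpre
      ((PySem.Str.splitlines markdown).map String.toList) [] false 1
    simp only [List.nil_append] at h
    simp only [h]
    rfl
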